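-- pv_equiv track=rewrite | github.com/kurtmoser/aoc2018 | aoc2018/day16/computer.py | decode_opcodes
-- ===== SOURCE A (Python) =====
-- def decode_opcodes(opcode_candidates):
--     decoded_opcodes = {}
--
--     for i in range(16):
--         for j, candidates in opcode_candidates.copy().items():
--             if len(candidates) == 1:
--                 decoded_opcodes[j] = list(candidates)[0]
--                 del(opcode_candidates[j])
--                 [opcode_candidates[k].discard(list(candidates)[0]) for k in opcode_candidates]
--
--     return decoded_opcodes
-- ===== SOURCE B (Python) =====
-- # Counter-driven single pass: one prebuilt inverted index (value -> opcodes) and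
-- # live candidate counters replace A's 16 rounds of dict-copy rescans and in-place
-- # set surgery; return-value equivalence only (A empties its argument, B does not).
-- def decode_opcodes(opcode_candidates):
--     cnt = {}
--     contains = {}
--     for j, c in opcode_candidates.items():
--         cnt[j] = len(c)
--         for v in c:
--             contains.setdefault(v, []).append(j)
--     decoded_opcodes = {}
--     used = set()
--     for j in list(opcode_candidates) * 16:
--         if j not in decoded_opcodes and cnt[j] == 1:
--             (v,) = opcode_candidates[j] - used
--             decoded_opcodes[j] = v
--             used.add(v)
--             for k in contains[v]:
--                 cnt[k] -= 1
--     return decoded_opcodes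
-- ===== Notes on version B (the rewrite author's own statement) =====
-- stated objective: alternative
-- what changed: B replaces A's 16 rounds of copy-the-dict-and-rescan with in-place set deletion by one flat pass over the key sequence repeated 16 times, driven by a prebuilt inverted index (value -> opcodes) and live per-opcode candidate counters: a resolution decrements the counters of exactly the affected opcodes instead of rewriting every remaining candidate set, and the resolved value is computed lazily once per resolution.
import Mathlib
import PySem

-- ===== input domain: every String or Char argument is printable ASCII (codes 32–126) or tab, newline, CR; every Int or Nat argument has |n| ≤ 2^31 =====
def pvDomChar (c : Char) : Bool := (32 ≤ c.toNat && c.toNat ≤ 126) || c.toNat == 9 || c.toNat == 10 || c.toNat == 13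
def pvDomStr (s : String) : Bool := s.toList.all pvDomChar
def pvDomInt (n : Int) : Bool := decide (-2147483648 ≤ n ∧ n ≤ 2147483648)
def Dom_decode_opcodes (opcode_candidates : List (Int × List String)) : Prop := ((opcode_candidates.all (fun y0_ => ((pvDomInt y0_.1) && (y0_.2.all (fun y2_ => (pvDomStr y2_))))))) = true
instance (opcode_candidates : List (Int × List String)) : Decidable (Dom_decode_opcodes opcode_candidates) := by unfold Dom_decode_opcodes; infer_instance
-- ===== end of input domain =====

-- B replaces A's 16 rounds of dict-copy rescans with in-place set mutation by one flat
-- pass over the key sequence repeated 16 times, driven by a prebuilt inverted index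
-- (value -> opcodes) and live candidate counters (alternative algorithm); equivalence is
-- about the RETURN value only: A empties its argument, B does not mutate it.


-- ===== PORT A =====
-- one snapshot item (j, candidates): the snapshot's set object aliases the stored one,
-- so the port reads the CURRENT value of key j; `list(candidates)[0]` on a singleton is headI
def pvStepA (st : PySem.Dict Int (List String) × PySem.Dict Int String) (j : Int) :
    PySem.Dict Int (List String) × PySem.Dict Int String :=
  let candidates := (st.1.get? j).getD []
  if candidates.length == 1 then
    let v := candidates.headI
    (PySem.Dict.mk (((st.1.erase j).items).map (fun p => (p.1, PySem.Set.discard p.2 v))),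
     st.2.insert j v)
  else st

-- `for j, candidates in opcode_candidates.copy().items():` — the key snapshot is taken once
def pvPassA (st : PySem.Dict Int (List String) × PySem.Dict Int String) :
    PySem.Dict Int (List String) × PySem.Dict Int String :=
  (st.1.keys).foldl pvStepA st

def decode_opcodes (opcode_candidates : List (Int × List String)) : List (Int × String) :=
  ((PySem.List.pyRange 0 16 1).foldl (fun st _ => pvPassA st)
    (PySem.Dict.ofList opcode_candidates, PySem.Dict.empty)).2.items

-- ===== PORT B =====
-- the first loop of Source B: builds (cnt, contains) in one pass over the items;
-- `contains.setdefault(v, []).append(j)` is Dict.modify v [] (· ++ [j])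
def pvIndexB (o : PySem.Dict Int (List String)) :
    PySem.Dict Int Int × PySem.Dict String (List Int) :=
  o.items.foldl (fun st jc =>
    (st.1.insert jc.1 (jc.2.length : Int),
     jc.2.foldl (fun m v => m.modify v [] (fun l => l ++ [jc.1])) st.2))
    (PySem.Dict.empty, PySem.Dict.empty)

-- state = (decoded_opcodes, used, cnt); cnt[j] and contains[v] are always present for the
-- keys/values looked up (j comes from the key list, v from some candidate set), so getD is
-- exact; `(v,) = opcode_candidates[j] - used` under the guard cnt[j]==1 unpacks the
-- singleton set difference, which is headI
def pvStepB (o : PySem.Dict Int (List String)) (idx : PySem.Dict String (List Int))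
    (st : PySem.Dict Int String × List String × PySem.Dict Int Int) (j : Int) :
    PySem.Dict Int String × List String × PySem.Dict Int Int :=
  if !(st.1.contains j) && (st.2.2.getD j 0 == 1) then
    let v := (PySem.Set.diff ((o.get? j).getD []) st.2.1).headI
    (st.1.insert j v, PySem.Set.add st.2.1 v,
     (idx.getD v []).foldl (fun c k => c.insert k (c.getD k 0 - 1)) st.2.2)
  else st

-- `for j in list(opcode_candidates) * 16:` — the key list repeated 16 times
def decode_opcodes_alt (opcode_candidates : List (Int × List String)) : List (Int × String) :=
  let o := PySem.Dict.ofList opcode_candidates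
  let ci := pvIndexB o
  ((List.replicate 16 o.keys).flatten.foldl (pvStepB o ci.2)
    (PySem.Dict.empty, PySem.Set.empty, ci.1)).1.items

-- ===== PRECONDITION & SPEC =====
def Spec_decode_opcodes (opcode_candidates : List (Int × List String)) (out : List (Int × String)) : Prop := out = decode_opcodes_alt opcode_candidates
instance (opcode_candidates : List (Int × List String)) (out : List (Int × String)) : Decidable (Spec_decode_opcodes opcode_candidates out) := by unfold Spec_decode_opcodes; infer_instance

-- ===== CLAIM (what is proved, stated in full; the proofs are below) =====
def Claim_equal_decode_opcodes : Prop := ∀ (opcode_candidates : List (Int × List String)), Dom_decode_opcodes opcode_candidates → Spec_decode_opcodes opcode_candidates (decode_opcodes opcode_candidates)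

-- ===== LEMMAS AND PROOFS =====

-- A's candidate dict, reconstructed from B's state: the undecoded part of the original
-- dict with the used values removed from every candidate set
def pvRestrict (o : PySem.Dict Int (List String)) (dec : PySem.Dict Int String)
    (used : List String) : PySem.Dict Int (List String) :=
  PySem.Dict.mk ((o.items.filter (fun p => !(dec.contains p.1))).map
    (fun p => (p.1, PySem.Set.diff p.2 used)))

-- B's state mapped to A's state
def pvPhi (o : PySem.Dict Int (List String))
    (st : PySem.Dict Int String × List String × PySem.Dict Int Int) :
    PySem.Dict Int (List String) × PySem.Dict Int String :=
  (pvRestrict o st.1 st.2.1, st.1)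

-- the counter invariant: cnt[k] is the size of k's remaining candidate set
def pvCntInv (o : PySem.Dict Int (List String))
    (st : PySem.Dict Int String × List String × PySem.Dict Int Int) : Prop :=
  ∀ k ∈ o.keys, st.2.2.getD k 0 = ((PySem.Set.diff ((o.get? k).getD []) st.2.1).length : Int)

-- ===== facts about the building blocks =====

theorem pvCountP_split (l : List String) (p : String → Bool) :
    l.countP p + l.countP (fun x => !p x) = l.length := by
  induction l with
  | nil => rfl
  | cons a t ih => by_cases h : p a <;> simp [h] <;> omega

theorem pvDiffLen (c used : List String) (v : String) (hv : v ∉ used) :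
    (PySem.Set.diff c used).length
      = (PySem.Set.diff c (used ++ [v])).length + c.count v := by
  have h1 : PySem.Set.diff c (used ++ [v])
      = (PySem.Set.diff c used).filter (fun x => !(x == v)) := by
    simp only [PySem.Set.diff, List.filter_filter]
    apply List.filter_congr
    intro x _
    by_cases hx : x = v <;> by_cases hu : x ∈ used <;> simp [hx, hu]
  have h2 : (PySem.Set.diff c used).count v = c.count v := by
    simp only [PySem.Set.diff]
    rw [List.count_filter]
    simp [hv]
  rw [h1, ← h2, List.count_eq_countP]
  have := pvCountP_split (PySem.Set.diff c used) (fun x => !(x == v))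
  simp only [Bool.not_not, List.countP_eq_length_filter] at this ⊢
  omega

theorem pvDecFold (l : List Int) (c : PySem.Dict Int Int) (x : Int) :
    (l.foldl (fun c k => c.insert k (c.getD k 0 - 1)) c).getD x 0
      = c.getD x 0 - l.count x := by
  induction l generalizing c with
  | nil => simp
  | cons a t ih =>
    simp only [List.foldl_cons, ih, PySem.Dict.getD_insert, List.count_cons]
    by_cases h : x = a
    · subst h; simp; ring
    · simp [h]
      omega

theorem pvFoldPair {α β γ : Type} (l : List γ) (f : α → γ → α) (g : β → γ → β)
    (a : α) (b : β) :
    l.foldl (fun st x => (f st.1 x, g st.2 x)) (a, b) = (l.foldl f a, l.foldl g b) := by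
  induction l generalizing a b with
  | nil => rfl
  | cons y t ih => simp [ih]

theorem pvIndexB_split (o : PySem.Dict Int (List String)) :
    pvIndexB o = (o.items.foldl (fun d jc => d.insert jc.1 (jc.2.length : Int)) PySem.Dict.empty,
      o.items.foldl (fun m jc => jc.2.foldl (fun m v => m.modify v [] (fun l => l ++ [jc.1])) m) PySem.Dict.empty) := by
  unfold pvIndexB
  exact pvFoldPair o.items (fun (d : PySem.Dict Int Int) jc => d.insert jc.1 ((jc.2.length : Int)))
    (fun (m : PySem.Dict String (List Int)) jc => jc.2.foldl (fun m v => m.modify v [] (fun l => l ++ [jc.1])) m) _ _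

theorem pvCnt0 (o : PySem.Dict Int (List String)) (hnd : o.keys.Nodup) (k : Int) (c : List String)
    (hc : o.get? k = some c) :
    (o.items.foldl (fun d jc => d.insert jc.1 ((jc.2.length : Int))) PySem.Dict.empty).getD k 0
      = (c.length : Int) := by
  have hfresh : ∀ p ∈ o.items, (PySem.Dict.empty : PySem.Dict Int Int).contains p.1 = false := by
    intro p _; exact PySem.Dict.contains_empty _
  have hnd' : (o.items.map (fun p => p.1)).Nodup := hnd
  have hitems := PySem.Dict.items_foldl_insert_fresh (l := o.items) (k := fun p => p.1)
    (v := fun p => ((p.2.length : Int))) (d := PySem.Dict.empty) hfresh hnd'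
  have hmem : (k, c) ∈ o.items := PySem.Dict.mem_items_of_get?_eq_some o hc
  have hmem2 : (k, (c.length : Int)) ∈ (o.items.foldl (fun d jc => d.insert jc.1 ((jc.2.length : Int))) PySem.Dict.empty).items := by
    rw [hitems]
    exact List.mem_map.mpr ⟨(k, c), hmem, rfl⟩
  have hk : (o.items.foldl (fun d jc => d.insert jc.1 ((jc.2.length : Int))) PySem.Dict.empty).keys
      = o.items.map (fun p => p.1) := by
    simp only [PySem.Dict.keys, hitems]
    simp [List.map_map, Function.comp, PySem.Dict.empty]
  exact PySem.Dict.getD_of_mem_items _ hmem2 (by rw [hk]; exact hnd') 0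

theorem pvIdxInner (c : List String) (j : Int) (m : PySem.Dict String (List Int)) (v : String) (k : Int) :
    ((c.foldl (fun m w => m.modify w [] (fun l => l ++ [j])) m).getD v []).count k
      = (m.getD v []).count k + if j = k then c.count v else 0 := by
  induction c generalizing m with
  | nil => simp
  | cons w t ih =>
    simp only [List.foldl_cons, ih, PySem.Dict.getD_modify]
    by_cases hv : v = w
    · subst hv
      rw [if_pos rfl, List.count_append, List.count_cons]
      by_cases hj : j = k
      · simp [hj]; omega
      · simp [hj]
    · rw [if_neg hv, List.count_cons]
      by_cases hj : j = k
      · simp [hj]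
        intro h
        exact absurd h.symm hv
      · simp [hj]

theorem pvIdxBuild (l : List (Int × List String)) (m : PySem.Dict String (List Int)) (v : String) (k : Int) :
    ((l.foldl (fun m jc => jc.2.foldl (fun m w => m.modify w [] (fun l => l ++ [jc.1])) m) m).getD v []).count k
      = (m.getD v []).count k + ((l.filter (fun p => p.1 = k)).map (fun p => p.2.count v)).sum := by
  induction l generalizing m with
  | nil => simp
  | cons p t ih =>
    simp only [List.foldl_cons, ih, pvIdxInner, List.filter_cons]
    by_cases hp : p.1 = k
    · simp [hp]
      omega
    · simp [hp]

theorem pvFilterKey {ν : Type} (l : List (Int × ν)) (k : Int) (hnd : (l.map (fun p => p.1)).Nodup) :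
    l.filter (fun p => p.1 = k)
      = match (l.find? (fun p => p.1 == k)) with
        | some pr => [pr]
        | none => [] := by
  induction l with
  | nil => simp
  | cons p t ih =>
    simp only [List.map_cons, List.nodup_cons] at hnd
    by_cases hp : p.1 = k
    · simp only [List.filter_cons, List.find?_cons, hp]
      simp only [decide_true]
      have : t.filter (fun p => p.1 = k) = [] := by
        apply List.filter_eq_nil_iff.mpr
        intro q hq
        simp only [decide_eq_true_eq]
        intro he
        exact hnd.1 (by rw [show p.1 = q.1 from by rw [hp, he]]; exact List.mem_map.mpr ⟨q, hq, rfl⟩)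
      simp [this]
    · simp only [List.filter_cons, List.find?_cons]
      have : (p.1 == k) = false := by simp [hp]
      simp [hp, this, ih hnd.2]

theorem pvIdxCount (o : PySem.Dict Int (List String)) (hnd : o.keys.Nodup) (v : String) (k : Int) :
    (((pvIndexB o).2).getD v []).count k = ((o.get? k).getD []).count v := by
  rw [pvIndexB_split]
  simp only
  rw [pvIdxBuild, pvFilterKey o.items k hnd]
  cases hfind : o.items.find? (fun p => p.1 == k) with
  | none =>
    simp [PySem.Dict.get?, hfind, PySem.Dict.getD_eq_get?_getD, PySem.Dict.empty, PySem.Dict.get?]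
  | some pr =>
    simp [PySem.Dict.get?, hfind, PySem.Dict.getD_eq_get?_getD, PySem.Dict.empty]

-- ===== restrict lemmas =====

theorem pvKeysRestrict (o : PySem.Dict Int (List String)) (dec : PySem.Dict Int String)
    (used : List String) :
    (pvRestrict o dec used).keys = o.keys.filter (fun k => !(dec.contains k)) := by
  simp only [pvRestrict, PySem.Dict.keys, List.map_map]
  rw [List.filter_map]
  rfl

theorem pvNodupRestrict (o : PySem.Dict Int (List String)) (hnd : o.keys.Nodup)
    (dec : PySem.Dict Int String) (used : List String) :
    (pvRestrict o dec used).keys.Nodup := by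
  rw [pvKeysRestrict]; exact hnd.filter _

theorem pvGetRestrict (o : PySem.Dict Int (List String)) (hnd : o.keys.Nodup)
    (dec : PySem.Dict Int String) (used : List String) (j : Int) (s : List String)
    (hj : dec.contains j = false) (hs : o.get? j = some s) :
    (pvRestrict o dec used).get? j = some (PySem.Set.diff s used) := by
  have hmem : (j, s) ∈ o.items := PySem.Dict.mem_items_of_get?_eq_some o hs
  have hmem2 : (j, PySem.Set.diff s used) ∈ (pvRestrict o dec used).items := by
    simp only [pvRestrict, List.mem_map, List.mem_filter]
    exact ⟨(j, s), ⟨hmem, by simp [hj]⟩, rfl⟩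
  exact PySem.Dict.get?_of_mem_items _ hmem2 (pvNodupRestrict o hnd dec used)

theorem pvRestrictEmpty (o : PySem.Dict Int (List String)) :
    pvRestrict o PySem.Dict.empty [] = o := by
  apply PySem.Dict.ext
  show _ = o.items
  simp only [pvRestrict]
  have h1 : o.items.filter (fun p => !((PySem.Dict.empty : PySem.Dict Int String).contains p.1)) = o.items := by
    apply List.filter_eq_self.mpr
    intro p _
    simp [PySem.Dict.contains_empty]
  rw [h1]
  have h2 : ∀ p : Int × List String, (p.1, PySem.Set.diff p.2 []) = p := by
    intro p; simp [PySem.Set.diff]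
  simp [h2]

theorem pvDiscardDiff (t elim : List String) (v : String) :
    PySem.Set.discard (PySem.Set.diff t elim) v = PySem.Set.diff t (elim ++ [v]) := by
  simp only [PySem.Set.discard, PySem.Set.diff, List.filter_filter]
  apply List.filter_congr
  intro x _
  by_cases hx : x = v <;> simp [hx]

theorem pvKeyUpdate (o : PySem.Dict Int (List String)) (dec : PySem.Dict Int String)
    (used : List String) (j : Int) (v : String) :
    PySem.Dict.mk (((pvRestrict o dec used).erase j).items.map
        (fun p => (p.1, PySem.Set.discard p.2 v)))
      = pvRestrict o (dec.insert j v) (used ++ [v]) := by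
  apply PySem.Dict.ext
  show (((pvRestrict o dec used).erase j).items.map _) = _
  simp only [pvRestrict, PySem.Dict.erase]
  rw [List.filter_map, List.map_map, List.filter_filter]
  simp only [Function.comp]
  have hcg : ∀ p ∈ o.items,
      ((!((p.1 : Int) == j)) && !(dec.contains p.1))
        = (!((dec.insert j v).contains p.1)) := by
    intro p _
    rw [PySem.Dict.contains_insert]
    by_cases hx : p.1 = j <;> simp [hx]
  rw [List.filter_congr hcg]
  apply List.map_congr_left
  intro p _
  simp [pvDiscardDiff]

-- ===== the per-pass correspondence =====

theorem pvPassCorr (o : PySem.Dict Int (List String)) (hnd : o.keys.Nodup) (ks : List Int)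
    (hks : ks.Sublist o.keys) :
    ∀ stB, pvCntInv o stB →
      ((ks.filter (fun x => !(stB.1.contains x))).foldl pvStepA (pvPhi o stB)
          = pvPhi o (ks.foldl (pvStepB o (pvIndexB o).2) stB))
      ∧ pvCntInv o (ks.foldl (pvStepB o (pvIndexB o).2) stB) := by
  induction ks with
  | nil => intro stB h; exact ⟨rfl, h⟩
  | cons j ks' ih =>
    intro stB hInv
    obtain ⟨dec, used, cnt⟩ := stB
    have hks' : ks'.Sublist o.keys := (List.sublist_cons_self j ks').trans hks
    have hjks' : j ∉ ks' := by
      have := hks.nodup hnd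
      exact (List.nodup_cons.mp this).1
    by_cases hdec : dec.contains j = true
    · -- j already decoded: A's list drops it, B's step is a no-op
      have hA : (j :: ks').filter (fun x => !(dec.contains x)) = ks'.filter (fun x => !(dec.contains x)) := by
        simp [hdec]
      have hB : pvStepB o (pvIndexB o).2 (dec, used, cnt) j = (dec, used, cnt) := by
        simp [pvStepB, hdec]
      rw [List.foldl_cons, hB, hA]
      exact ih hks' (dec, used, cnt) hInv
    · have hdec' : dec.contains j = false := by simpa using hdec
      have hjk : j ∈ o.keys := hks.subset (by simp)
      obtain ⟨c, hc⟩ : ∃ c, o.get? j = some c := by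
        have := (PySem.Dict.contains_iff_mem_keys o j).mpr hjk
        rw [PySem.Dict.contains_eq_isSome_get?] at this
        exact Option.isSome_iff_exists.mp this
      have hcnt : cnt.getD j 0 = ((PySem.Set.diff c used).length : Int) := by
        have := hInv j hjk
        rwa [hc] at this
      have hgetR : (pvRestrict o dec used).get? j = some (PySem.Set.diff c used) :=
        pvGetRestrict o hnd dec used j c hdec' hc
      have hA0 : (j :: ks').filter (fun x => !(dec.contains x))
          = j :: ks'.filter (fun x => !(dec.contains x)) := by
        simp [hdec']
      by_cases hlen : (PySem.Set.diff c used).length = 1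
      · -- resolution step
        set v := (PySem.Set.diff c used).headI with hv
        have hrem : PySem.Set.diff c used = [v] := by
          obtain ⟨a, ha⟩ := List.length_eq_one_iff.mp hlen
          rw [ha]; simp [hv, ha]
        have hvd : v ∈ PySem.Set.diff c used := by rw [hrem]; simp
        have hvused : v ∉ used := ((PySem.Set.mem_diff c used v).mp hvd).2
        have hadd : PySem.Set.add used v = used ++ [v] := PySem.Set.add_of_not_mem hvused
        have hB : pvStepB o (pvIndexB o).2 (dec, used, cnt) j
            = (dec.insert j v, used ++ [v],
               (((pvIndexB o).2).getD v []).foldl (fun c k => c.insert k (c.getD k 0 - 1)) cnt) := by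
          simp only [pvStepB, hdec', hcnt, hc]
          rw [if_pos (by simp [hlen])]
          simp only [Option.getD_some, ← hv, hadd]
        have hAstep : pvStepA (pvPhi o (dec, used, cnt)) j
            = (pvRestrict o (dec.insert j v) (used ++ [v]), dec.insert j v) := by
          simp only [pvStepA, pvPhi, hgetR, Option.getD_some]
          rw [if_pos (by simp [hlen])]
          rw [pvKeyUpdate]
        set cnt' := (((pvIndexB o).2).getD v []).foldl (fun c k => c.insert k (c.getD k 0 - 1)) cnt with hcnt'
        have hInv' : pvCntInv o (dec.insert j v, used ++ [v], cnt') := by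
          intro k hk
          obtain ⟨ck, hck⟩ : ∃ ck, o.get? k = some ck := by
            have := (PySem.Dict.contains_iff_mem_keys o k).mpr hk
            rw [PySem.Dict.contains_eq_isSome_get?] at this
            exact Option.isSome_iff_exists.mp this
          show cnt'.getD k 0 = _
          rw [hcnt', pvDecFold, pvIdxCount o hnd v k, hck]
          have hbase := hInv k hk
          rw [hck] at hbase
          simp only [Option.getD_some] at hbase ⊢
          rw [hbase]
          have := pvDiffLen ck used v hvused
          omega
        rw [hA0, List.foldl_cons, List.foldl_cons, hB, hAstep]
        have hfilt : ks'.filter (fun x => !(dec.contains x))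
            = ks'.filter (fun x => !((dec.insert j v).contains x)) := by
          apply List.filter_congr
          intro x hx
          rw [PySem.Dict.contains_insert]
          have : x ≠ j := fun he => hjks' (he ▸ hx)
          simp [this]
        rw [hfilt]
        have := ih hks' (dec.insert j v, used ++ [v], cnt') hInv'
        exact ⟨by rw [← this.1]; rfl, this.2⟩
      · -- no resolution: both sides are no-ops on j
        have hB : pvStepB o (pvIndexB o).2 (dec, used, cnt) j = (dec, used, cnt) := by
          simp only [pvStepB, hdec', hcnt]
          rw [if_neg (by simp [hlen])]
        have hAstep : pvStepA (pvPhi o (dec, used, cnt)) j = pvPhi o (dec, used, cnt) := by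
          simp only [pvStepA, pvPhi, hgetR, Option.getD_some]
          rw [if_neg (by simp [hlen])]
        rw [hA0, List.foldl_cons, List.foldl_cons, hB, hAstep]
        exact ih hks' (dec, used, cnt) hInv

-- ===== rounds =====

theorem pvRoundsCorr (o : PySem.Dict Int (List String)) (hnd : o.keys.Nodup) (L : List Int) :
    ∀ stB, pvCntInv o stB →
      L.foldl (fun st _ => pvPassA st) (pvPhi o stB)
        = pvPhi o ((List.replicate L.length o.keys).flatten.foldl (pvStepB o (pvIndexB o).2) stB)
      ∧ pvCntInv o ((List.replicate L.length o.keys).flatten.foldl (pvStepB o (pvIndexB o).2) stB) := by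
  induction L with
  | nil => intro stB h; exact ⟨rfl, h⟩
  | cons x L' ih =>
    intro stB hInv
    have hkeys : (pvPhi o stB).1.keys = o.keys.filter (fun k => !(stB.1.contains k)) :=
      pvKeysRestrict o stB.1 stB.2.1
    have hpass := pvPassCorr o hnd o.keys (List.Sublist.refl _) stB hInv
    have hPA : pvPassA (pvPhi o stB) = pvPhi o (o.keys.foldl (pvStepB o (pvIndexB o).2) stB) := by
      show (pvPhi o stB).1.keys.foldl pvStepA (pvPhi o stB) = _
      rw [hkeys, ← hpass.1]
    simp only [List.foldl_cons, List.length_cons, List.replicate_succ, List.flatten_cons,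
      List.foldl_append]
    rw [hPA]
    exact ih _ hpass.2

theorem decode_opcodes_eq (oc : List (Int × List String)) :
    decode_opcodes oc = decode_opcodes_alt oc := by
  unfold decode_opcodes decode_opcodes_alt
  set o := PySem.Dict.ofList oc with ho
  have hnd : o.keys.Nodup := PySem.Dict.nodup_keys_ofList oc
  have hInv0 : pvCntInv o (PySem.Dict.empty, PySem.Set.empty, (pvIndexB o).1) := by
    intro k hk
    obtain ⟨c, hc⟩ : ∃ c, o.get? k = some c := by
      have := (PySem.Dict.contains_iff_mem_keys o k).mpr hk
      rw [PySem.Dict.contains_eq_isSome_get?] at this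
      exact Option.isSome_iff_exists.mp this
    show ((pvIndexB o).1).getD k 0 = _
    rw [pvIndexB_split]
    simp only
    rw [pvCnt0 o hnd k c hc, hc]
    simp [PySem.Set.diff, PySem.Set.empty]
  have hlen : (PySem.List.pyRange 0 16 1).length = 16 := by decide
  have h := pvRoundsCorr o hnd (PySem.List.pyRange 0 16 1)
    (PySem.Dict.empty, PySem.Set.empty, (pvIndexB o).1) hInv0
  rw [hlen] at h
  have hinit : (pvPhi o (PySem.Dict.empty, PySem.Set.empty, (pvIndexB o).1))
      = (o, PySem.Dict.empty) := by
    simp only [pvPhi]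
    rw [show (PySem.Set.empty : List String) = [] from rfl, pvRestrictEmpty]
  rw [← hinit, h.1]
  rfl

-- ===== VERDICT (by name: the statement is the Claim_ definition above) =====
theorem decode_opcodes_spec : Claim_equal_decode_opcodes := by
  intro oc _
  unfold Spec_decode_opcodes
  exact decode_opcodes_eq oc
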